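-- pv_equiv track=rewrite | github.com/magenta-aps/OS2mo-ldap-import-export | mo_ldap_import_export/usernames.py | _create_common_name
-- ===== SOURCE A (Python) =====
-- from collections.abc import Iterator
--
-- def _create_common_name(
--     name: list[str], existing_common_names: list[str]
-- ) -> str:
--     """
--     Create an LDAP-style common name (CN) based on first and last name
--
--     If a name exists, "_2" is added. If that one also exists, "_3" is added,
--     and so on
--
--     Examples
--     -------------
--     >>> _create_common_name(["Keanu","Reeves"])
--     >>> "Keanu Reeves"
--     """
--
--     def permutations(username: str) -> Iterator[str]:
--         yield username
--         for permutation_counter in range(2, 1000):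
--             yield username + "_" + str(permutation_counter)
--
--     def existing(potential_name: str) -> bool:
--         return potential_name.lower() in existing_common_names
--
--     name = [n for n in name if n]
--     num_middlenames = len(name) - 2
--
--     # Shorten a name if it is over 64 chars
--     # see http://msdn.microsoft.com/en-us/library/ms675449(VS.85).aspx
--     common_name = " ".join(name)
--     while len(common_name) > 60 and num_middlenames > 0:
--         # Remove one middlename
--         num_middlenames -= 1
--         # Try to make a name with the selected number of middlenames
--         givenname, *middlenames, surname = name
--         middlenames = middlenames[:num_middlenames]
--         common_name = " ".join([givenname] + middlenames + [surname])
--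
--     # Cut off the name (leave place for the permutation counter)
--     common_name = common_name[:60]
--
--     for potential_name in permutations(common_name):
--         if existing(potential_name):
--             continue
--         return potential_name
--
--     raise RuntimeError("Failed to create common name")
-- ===== SOURCE B (Python) =====
-- def _create_common_name(name, existing_common_names):
--     names = [n for n in name if n]
--     if len(names) >= 3:
--         given = names[0]
--         sur = names[-1]
--         middles = names[1:-1]
--         full = " ".join(names)
--         if len(full) > 60:
--             # largest k such that given + first k middles + sur fits in 60 chars
--             k = 0
--             total = len(given) + len(sur) + 1
--             for m in middles:
--                 total += len(m) + 1
--                 if total > 60: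
--                     break
--                 k += 1
--             common_name = " ".join([given] + middles[:k] + [sur])
--         else:
--             common_name = full
--     else:
--         common_name = " ".join(names)
--     common_name = common_name[:60]
--     existing = set(existing_common_names)
--     if common_name.lower() not in existing:
--         return common_name
--     for i in range(2, 1000):
--         cand = common_name + "_" + str(i)
--         if cand.lower() not in existing:
--             return cand
--     raise RuntimeError("Failed to create common name")
-- ===== Notes on version B (the rewrite author's own statement) =====
-- stated objective: faster
-- what changed: The while-loop that repeatedly rebuilds and re-measures the joined name is replaced by one forward cumulative-length pass over the middle names that computes the largest fitting prefix and builds the common name once; the candidate search checks the base name explicitly and tests membership against a set built once.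
import Mathlib
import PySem

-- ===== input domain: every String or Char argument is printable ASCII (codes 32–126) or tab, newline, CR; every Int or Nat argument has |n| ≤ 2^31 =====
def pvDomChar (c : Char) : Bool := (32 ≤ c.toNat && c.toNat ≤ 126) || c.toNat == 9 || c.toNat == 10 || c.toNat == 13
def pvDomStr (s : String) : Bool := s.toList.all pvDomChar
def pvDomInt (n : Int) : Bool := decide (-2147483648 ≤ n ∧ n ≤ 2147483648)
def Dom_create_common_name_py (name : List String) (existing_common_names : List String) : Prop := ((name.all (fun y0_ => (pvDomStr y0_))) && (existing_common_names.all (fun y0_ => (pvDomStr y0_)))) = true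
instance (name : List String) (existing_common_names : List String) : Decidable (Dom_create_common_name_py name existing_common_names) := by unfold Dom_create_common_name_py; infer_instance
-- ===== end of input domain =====

-- B replaces A's while-loop (which repeatedly rebuilds and re-measures the joined name) by one
-- cumulative-length pass computing the largest fitting middle-name prefix, building the name once;
-- the candidate search checks the base name explicitly and uses a set (objective: faster, measured).

-- ===== PORT A =====
-- the `while len(common_name) > 60 and num_middlenames > 0` loop; fuel = num_middlenames
def pvShortenA (nm : List String) : Nat → String → String
  | 0, common_name => common_name
  | Nat.succ num_middlenames, common_name =>
      if 60 < PySem.Str.len common_name then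
        -- givenname, *middlenames, surname = name
        let givenname := nm.headD ""
        let middlenames := PySem.List.slice nm (some 1) (some (-1))
        let surname := nm.getLastD ""
        let middlenames := PySem.List.slice middlenames none (some (num_middlenames : Int))
        pvShortenA nm num_middlenames (PySem.Str.join " " ([givenname] ++ middlenames ++ [surname]))
      else common_name

-- the `permutations` generator, materialised
def pvPermsA (username : String) : List String :=
  username :: (PySem.List.pyRange 2 1000 1).map
    (fun permutation_counter => username ++ "_" ++ PySem.Int.toStr permutation_counter)

-- the `for potential_name in permutations(...)` loop; [] = RuntimeError (excluded by Pre_)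
def pvSearchA (existing_common_names : List String) : List String → String
  | [] => ""
  | potential_name :: rest =>
      if PySem.Str.lower potential_name ∈ existing_common_names then
        pvSearchA existing_common_names rest
      else potential_name

def create_common_name_py (name : List String) (existing_common_names : List String) : String :=
  let name := name.filter (fun n => n ≠ "")
  let num_middlenames : Int := PySem.List.len name - 2
  let common_name := PySem.Str.join " " name
  let common_name := pvShortenA name num_middlenames.toNat common_name
  let common_name := PySem.Str.slice common_name none (some 60)
  pvSearchA existing_common_names (pvPermsA common_name)

-- ===== PORT B =====
-- forward cumulative-length pass: number of leading middle names that keep the total ≤ 60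
def pvFitCount : Int → List String → Nat
  | _, [] => 0
  | total, m :: rest =>
      let total' := total + PySem.Str.len m + 1
      if 60 < total' then 0 else 1 + pvFitCount total' rest

-- the `for i in range(2, 1000)` loop of B; [] = RuntimeError (excluded by Pre_)
def pvSearchB (existing : PySem.Set String) (common_name : String) : List Int → String
  | [] => ""
  | i :: rest =>
      let cand := common_name ++ "_" ++ PySem.Int.toStr i
      if PySem.Str.lower cand ∈ existing then pvSearchB existing common_name rest else cand

def create_common_name_py_alt (name : List String) (existing_common_names : List String) : String :=
  let names := name.filter (fun n => n ≠ "")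
  let common_name :=
    if 3 ≤ names.length then
      let given := names.headD ""
      let sur := names.getLastD ""
      let middles := PySem.List.slice names (some 1) (some (-1))
      let full := PySem.Str.join " " names
      if 60 < PySem.Str.len full then
        let k := pvFitCount (PySem.Str.len given + PySem.Str.len sur + 1) middles
        PySem.Str.join " " ([given] ++ PySem.List.slice middles none (some (k : Int)) ++ [sur])
      else full
    else PySem.Str.join " " names
  let common_name := PySem.Str.slice common_name none (some 60)
  let existing := PySem.Set.ofList existing_common_names
  if PySem.Str.lower common_name ∈ existing then
    pvSearchB existing common_name (PySem.List.pyRange 2 1000 1)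
  else common_name

-- ===== PRECONDITION & SPEC =====
-- standalone closed-form description of the 60-char base common name A derives from `name`
-- (largest fitting prefix of the middle names; used only to state Pre_, reached by neither port)
def pvPreBase (name : List String) : String :=
  let ns := name.filter (fun n => n ≠ "")
  let full := PySem.Str.join " " ns
  let base :=
    if 3 ≤ ns.length ∧ 60 < PySem.Str.len full then
      let g := ns.headD ""
      let s := ns.getLastD ""
      let ms := (ns.drop 1).dropLast
      -- cumulative lengths of "g m1 … mj s": keep the prefixes whose total stays ≤ 60
      let totals := ((ms.map (fun m => PySem.Str.len m + 1)).scanl (· + ·)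
        (PySem.Str.len g + PySem.Str.len s + 1)).tail
      let k := (totals.takeWhile (fun t => t ≤ 60)).length
      PySem.Str.join " " ([g] ++ ms.take k ++ [s])
    else full
  PySem.Str.slice base none (some 60)
-- Pre_ excludes exactly the inputs on which A raises RuntimeError: those where the base name and
-- every suffixed candidate "_2".."_999" all occur (lowercased) in existing_common_names.
def Pre_create_common_name_py (name : List String) (existing_common_names : List String) : Prop :=
  PySem.Str.lower (pvPreBase name) ∉ existing_common_names ∨
    ∃ i ∈ PySem.List.pyRange 2 1000 1,
      PySem.Str.lower (pvPreBase name ++ "_" ++ PySem.Int.toStr i) ∉ existing_common_names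
instance (name : List String) (existing_common_names : List String) : Decidable (Pre_create_common_name_py name existing_common_names) := by unfold Pre_create_common_name_py; infer_instance
def pvWitness_create_common_name_py : List String × List String := (["Keanu", "Reeves"], [])

def Spec_create_common_name_py (name : List String) (existing_common_names : List String) (out : String) : Prop := out = create_common_name_py_alt name existing_common_names
instance (name : List String) (existing_common_names : List String) (out : String) : Decidable (Spec_create_common_name_py name existing_common_names out) := by unfold Spec_create_common_name_py; infer_instance

-- ===== CLAIM (what is proved, stated in full; the proofs are below) =====
def Claim_equal_create_common_name_py : Prop := ∀ (name : List String) (existing_common_names : List String), Dom_create_common_name_py name existing_common_names → Pre_create_common_name_py name existing_common_names → Spec_create_common_name_py name existing_common_names (create_common_name_py name existing_common_names)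

-- ===== LEMMAS AND PROOFS =====

lemma pv_len_nonneg (s : String) : 0 ≤ PySem.Str.len s := by
  simp [pysem]

lemma pv_slice_one_neg_one {α : Type} (xs : List α) :
    PySem.List.slice xs (some 1) (some (-1)) = (xs.drop 1).dropLast := by
  unfold PySem.List.slice PySem.List.clampIdx
  rcases xs with _ | ⟨a, t⟩
  · simp
  · norm_num
    rw [List.dropLast_eq_take]
    constructor

lemma pv_cons_decomp {α : Type} (l : List α) : ∀ (a d : α), a :: l = (a :: l).dropLast ++ [(a :: l).getLastD d] := by
  induction l with
  | nil => intro a d; rfl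
  | cons b t ih =>
      intro a d
      rw [show (a :: b :: t).dropLast = a :: (b :: t).dropLast from rfl, List.getLastD_cons]
      exact congrArg (a :: ·) (ih b a)

lemma pv_decompose (l : List String) (h : 2 ≤ l.length) :
    l = l.headD "" :: ((l.drop 1).dropLast ++ [l.getLastD ""]) := by
  rcases l with _ | ⟨a, t⟩
  · simp at h
  · rcases t with _ | ⟨b, u⟩
    · simp at h
    · rw [List.headD_cons, List.drop_one, List.tail_cons, List.getLastD_cons]
      exact congrArg (a :: ·) (pv_cons_decomp u b a)

-- string-level join unfolding
lemma pv_join_cons_cons (sep p q : String) (rest : List String) :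
    PySem.Str.join sep (p :: q :: rest) = p ++ sep ++ PySem.Str.join sep (q :: rest) := by
  apply String.toList_inj.mp
  simp [PySem.Str.toList_join, PySem.Chars.join_cons_cons]

lemma pv_join_singleton (sep p : String) : PySem.Str.join sep [p] = p := by
  apply String.toList_inj.mp
  simp [PySem.Str.toList_join, PySem.Chars.join_singleton]

-- length of "g m1 … mk s"
lemma pv_len_join (g s : String) (ms : List String) :
    PySem.Str.len (PySem.Str.join " " ([g] ++ ms ++ [s])) =
      PySem.Str.len g + PySem.Str.len s + 1 + (ms.map (fun x => PySem.Str.len x + 1)).sum := by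
  induction ms generalizing g with
  | nil =>
      rw [show ([g] ++ [] ++ [s] : List String) = g :: [s] by simp, pv_join_cons_cons,
          pv_join_singleton, PySem.Str.len_append, PySem.Str.len_append,
          show PySem.Str.len " " = 1 from by decide]
      simp only [List.map_nil, List.sum_nil]
      ring
  | cons m rest ih =>
      have : [g] ++ (m :: rest) ++ [s] = g :: (([m] ++ rest ++ [s])) := by simp
      rw [this, show g :: ([m] ++ rest ++ [s]) = g :: m :: (rest ++ [s]) by simp,
          pv_join_cons_cons, PySem.Str.len_append, PySem.Str.len_append,
          show (m :: (rest ++ [s])) = [m] ++ rest ++ [s] by simp, ih m]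
      have h1 : PySem.Str.len " " = 1 := by decide
      rw [h1]
      simp only [List.map_cons, List.sum_cons]
      ring

-- ∑ of the (length+1)-weights of the first j middle names
def pvP (base : Int) (ms : List String) (j : Nat) : Int :=
  base + ((ms.take j).map (fun x => PySem.Str.len x + 1)).sum

lemma pv_fit_le (t : Int) (l : List String) : pvFitCount t l ≤ l.length := by
  induction l generalizing t with
  | nil => simp [pvFitCount]
  | cons m rest ih =>
      simp only [pvFitCount, List.length_cons]
      split_ifs
      · omega
      · have := ih (t + PySem.Str.len m + 1)
        omega

lemma pv_fit_iff (t : Int) (l : List String) (j : Nat) (h1 : 1 ≤ j) (h2 : j ≤ l.length) :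
    (pvP t l j ≤ 60 ↔ j ≤ pvFitCount t l) := by
  induction l generalizing t j with
  | nil => simp at h2; omega
  | cons m rest ih =>
      rcases j with _ | j
      · omega
      have htake : (m :: rest).take (j + 1) = m :: rest.take j := by simp
      simp only [pvFitCount, pvP, htake, List.map_cons, List.sum_cons]
      rcases Nat.eq_zero_or_pos j with hj | hj
      · subst hj
        simp only [List.take_zero, List.map_nil, List.sum_nil, add_zero]
        split_ifs with h
        · constructor
          · intro hle; omega
          · intro hle; omega
        · constructor
          · intro _; omega
          · intro _; omega
      · have h2' : j ≤ rest.length := by simp at h2; omega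
        have := ih (t + PySem.Str.len m + 1) j hj h2'
        simp only [pvP] at this
        split_ifs with h
        · constructor
          · intro hle
            exfalso
            have hnn : 0 ≤ ((rest.take j).map (fun x => PySem.Str.len x + 1)).sum := by
              apply List.sum_nonneg
              intro x hx
              simp only [List.mem_map] at hx
              obtain ⟨y, _, rfl⟩ := hx
              have := pv_len_nonneg y
              omega
            omega
          · intro hle; omega
        · constructor
          · intro hle
            have : j ≤ pvFitCount (t + PySem.Str.len m + 1) rest := this.mp (by omega)
            omega
          · intro hle
            have : pvP (t + PySem.Str.len m + 1) rest j ≤ 60 := this.mpr (by omega)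
            simp only [pvP] at this
            omega

-- the joined name with the first k middle names kept
def pvJ (g s : String) (ms : List String) (k : Nat) : String :=
  PySem.Str.join " " ([g] ++ ms.take k ++ [s])

lemma pv_len_pvJ (g s : String) (ms : List String) (k : Nat) :
    PySem.Str.len (pvJ g s ms k) = pvP (PySem.Str.len g + PySem.Str.len s + 1) ms k := by
  unfold pvJ pvP
  rw [pv_len_join]

lemma pv_shorten_eq (g s : String) (ms : List String)
    (k : Nat) (hk : k ≤ ms.length) :
    pvShortenA (g :: (ms ++ [s])) k (pvJ g s ms k) =
      pvJ g s ms (min k (pvFitCount (PySem.Str.len g + PySem.Str.len s + 1) ms)) := by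
  induction k with
  | zero => simp [pvShortenA]
  | succ k ih =>
      simp only [pvShortenA]
      rw [pv_len_pvJ]
      have hmid : PySem.List.slice (g :: (ms ++ [s])) (some 1) (some (-1)) = ms := by
        rw [pv_slice_one_neg_one]; simp
      split_ifs with h
      · -- too long: drop one middle name and loop
        have hfit : ¬ (k + 1 ≤ pvFitCount (PySem.Str.len g + PySem.Str.len s + 1) ms) := by
          intro hle
          have := (pv_fit_iff (PySem.Str.len g + PySem.Str.len s + 1) ms (k + 1) (by omega) hk).mpr hle
          omega
        rw [hmid, PySem.List.slice_to_natCast]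
        have hlast : (g :: (ms ++ [s])).getLastD "" = s := by
          rw [show g :: (ms ++ [s]) = (g :: ms) ++ [s] by simp, List.getLastD_concat]
        have hbody : PySem.Str.join " "
            ([(g :: (ms ++ [s])).headD ""] ++ ms.take k ++ [(g :: (ms ++ [s])).getLastD ""]) =
            pvJ g s ms k := by
          unfold pvJ
          rw [hlast]
          rfl
        rw [hbody, ih (by omega)]
        congr 1
        omega
      · -- fits: stop
        have hfit : k + 1 ≤ pvFitCount (PySem.Str.len g + PySem.Str.len s + 1) ms :=
          (pv_fit_iff (PySem.Str.len g + PySem.Str.len s + 1) ms (k + 1) (by omega) hk).mp (by omega)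
        congr 1
        omega

lemma pv_shorten_stop (nm : List String) (k : Nat) (c : String) (h : ¬ 60 < PySem.Str.len c) :
    pvShortenA nm k c = c := by
  cases k with
  | zero => rfl
  | succ k => simp only [pvShortenA]; rw [if_neg h]

lemma pv_search_inner (ex : List String) (c : String) (L : List Int) :
    pvSearchA ex (L.map (fun i => c ++ "_" ++ PySem.Int.toStr i)) =
      pvSearchB (PySem.Set.ofList ex) c L := by
  induction L with
  | nil => simp [pvSearchA, pvSearchB]
  | cons i rest ih =>
      simp only [List.map_cons, pvSearchA, pvSearchB]
      rw [ih]
      by_cases h : PySem.Str.lower (c ++ "_" ++ PySem.Int.toStr i) ∈ ex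
      · rw [if_pos h, if_pos ((PySem.Set.mem_ofList ex _).mpr h)]
      · rw [if_neg h, if_neg (fun hc => h ((PySem.Set.mem_ofList ex _).mp hc))]

lemma pv_search_eq (ex : List String) (c : String) :
    pvSearchA ex (pvPermsA c) =
      (if PySem.Str.lower c ∈ PySem.Set.ofList ex then
        pvSearchB (PySem.Set.ofList ex) c (PySem.List.pyRange 2 1000 1)
      else c) := by
  unfold pvPermsA
  simp only [pvSearchA]
  rw [pv_search_inner]
  by_cases h : PySem.Str.lower c ∈ ex
  · rw [if_pos h, if_pos ((PySem.Set.mem_ofList ex _).mpr h)]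
  · rw [if_neg h, if_neg (fun hc => h ((PySem.Set.mem_ofList ex _).mp hc))]

-- the shortening phases agree (before truncation)
lemma pv_phase1_eq (nm : List String) :
    pvShortenA nm (PySem.List.len nm - 2).toNat (PySem.Str.join " " nm) =
      (if 3 ≤ nm.length then
        if 60 < PySem.Str.len (PySem.Str.join " " nm) then
          let g := nm.headD ""
          let s := nm.getLastD ""
          let ms := PySem.List.slice nm (some 1) (some (-1))
          let k := pvFitCount (PySem.Str.len g + PySem.Str.len s + 1) ms
          PySem.Str.join " " ([g] ++ PySem.List.slice ms none (some (k : Int)) ++ [s])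
        else PySem.Str.join " " nm
      else PySem.Str.join " " nm) := by
  by_cases h3 : 3 ≤ nm.length
  · rw [if_pos h3]
    have hdec := pv_decompose nm (by omega)
    set g := nm.headD "" with hg
    set s := nm.getLastD "" with hs
    set ms := (nm.drop 1).dropLast with hms
    have hmslen : ms.length = nm.length - 2 := by
      rw [hms]; rcases nm with _ | ⟨a, t⟩
      · simp at h3
      · simp
    have htoNat : (PySem.List.len nm - 2).toNat = ms.length := by
      simp only [PySem.List.len_eq]
      omega
    have hfull : PySem.Str.join " " nm = pvJ g s ms ms.length := by
      unfold pvJ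
      rw [List.take_length]
      conv_lhs => rw [hdec]
      simp
    by_cases h60 : 60 < PySem.Str.len (PySem.Str.join " " nm)
    · rw [if_pos h60, htoNat]
      have := pv_shorten_eq g s ms ms.length (le_refl _)
      rw [← hdec] at this
      rw [hfull, this]
      have hfit := pv_fit_le (PySem.Str.len g + PySem.Str.len s + 1) ms
      rw [min_eq_right hfit]
      simp only [pv_slice_one_neg_one, ← hms, PySem.List.slice_to_natCast]
      rfl
    · rw [if_neg h60, pv_shorten_stop _ _ _ h60]
  · rw [if_neg h3]
    have : (PySem.List.len nm - 2).toNat = 0 := by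
      simp only [PySem.List.len_eq]
      omega
    rw [this]
    simp [pvShortenA]

-- ===== VERDICT (by name: the statement is the Claim_ definition above) =====
theorem create_common_name_py_spec : Claim_equal_create_common_name_py := by
  intro name existing_common_names _hdom _hpre
  unfold Spec_create_common_name_py create_common_name_py create_common_name_py_alt
  simp only []
  rw [pv_phase1_eq]
  rw [pv_search_eq]
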